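-- pv_equiv track=rewrite | github.com/emmapann/AdventOfCode_2023 | day11.py | replace_hashes_with_count
-- ===== SOURCE A (Python) =====
-- def replace_hashes_with_count(matrix):
--     hash_count = 0
--     for i in range(len(matrix)):
--         for j in range(len(matrix[i])):
--             if matrix[i][j] == '#':
--                 hash_count += 1
--                 matrix[i][j] = hash_count
--             else:
--                 matrix[i][j] = 0
--
--     return matrix, hash_count  # Return the modified array
-- ===== SOURCE B (Python) =====
-- def replace_hashes_with_count(matrix):
--     positions = []
--     for i, row in enumerate(matrix):
--         for j, cell in enumerate(row):
--             if cell == '#':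
--                 positions.append((i, j))
--             row[j] = 0
--     for k, (i, j) in enumerate(positions):
--         matrix[i][j] = k + 1
--     return matrix, len(positions)
-- ===== Notes on version B (the rewrite author's own statement) =====
-- stated objective: alternative
-- what changed: B first collects the coordinates of all '#' cells while zeroing the matrix, then labels the collected positions 1..n in a separate pass, instead of interleaving counting with per-cell assignment.
import Mathlib
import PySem

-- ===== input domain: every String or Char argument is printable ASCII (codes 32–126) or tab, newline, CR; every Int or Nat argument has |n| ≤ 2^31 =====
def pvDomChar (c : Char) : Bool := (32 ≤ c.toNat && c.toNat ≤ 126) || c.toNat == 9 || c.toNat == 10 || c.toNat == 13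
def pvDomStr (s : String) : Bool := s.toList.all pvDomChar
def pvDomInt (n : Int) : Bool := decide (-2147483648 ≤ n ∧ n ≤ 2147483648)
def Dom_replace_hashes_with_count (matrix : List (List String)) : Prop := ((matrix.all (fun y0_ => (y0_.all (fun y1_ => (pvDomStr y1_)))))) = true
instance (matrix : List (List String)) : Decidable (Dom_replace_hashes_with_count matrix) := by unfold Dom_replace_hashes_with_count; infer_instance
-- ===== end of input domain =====

-- B collects the coordinates of all '#' cells while zeroing the matrix, then labels them 1..n
-- in a second pass (alternative decomposition, same cost).  Both Pythons mutate their argument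
-- in place to the same final state; the equivalence proved here is about the RETURN value.

-- ===== PORT A =====
-- literal transliteration of A: row-major sweep, per-cell assignment with a running counter
def rhwcStepCellA (p : List Int × Int) (c : String) : List Int × Int :=
  if c == "#" then (p.1 ++ [p.2 + 1], p.2 + 1) else (p.1 ++ [(0 : Int)], p.2)

def rhwcStepRowA (st : List (List Int) × Int) (row : List String) : List (List Int) × Int :=
  let inner := row.foldl rhwcStepCellA ([], st.2)
  (st.1 ++ [inner.1], inner.2)

def replace_hashes_with_count (matrix : List (List String)) : List (List Int) × Int :=
  matrix.foldl rhwcStepRowA ([], 0)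

-- ===== PORT B =====
-- matrix[i][j] = v; i, j here always come from enumerate so they are nonnegative and in range,
-- on which this is exact Python indexing-assignment
def rhwcSet2 (m : List (List Int)) (i j : Int) (v : Int) : List (List Int) :=
  m.set i.toNat ((m.getD i.toNat []).set j.toNat v)

def rhwcStepCellB (i : Int) (q : List Int × List (Int × Int)) (c : Int × String) : List Int × List (Int × Int) :=
  (q.1 ++ [(0 : Int)], if c.2 == "#" then q.2 ++ [(i, c.1)] else q.2)

def rhwcStepRowB (st : List (List Int) × List (Int × Int)) (p : Int × List String) : List (List Int) × List (Int × Int) :=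
  let inner := (PySem.List.enumerate p.2 0).foldl (rhwcStepCellB p.1) ([], st.2)
  (st.1 ++ [inner.1], inner.2)

def rhwcStepSet (m : List (List Int)) (kp : Int × (Int × Int)) : List (List Int) :=
  rhwcSet2 m kp.2.1 kp.2.2 (kp.1 + 1)

def replace_hashes_with_count_alt (matrix : List (List String)) : List (List Int) × Int :=
  let first := (PySem.List.enumerate matrix 0).foldl rhwcStepRowB ([], [])
  let m := (PySem.List.enumerate first.2 0).foldl rhwcStepSet first.1
  (m, (first.2.length : Int))

-- ===== PRECONDITION & SPEC =====
def Spec_replace_hashes_with_count (matrix : List (List String)) (out : List (List Int) × Int) : Prop := out = replace_hashes_with_count_alt matrix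
instance (matrix : List (List String)) (out : List (List Int) × Int) : Decidable (Spec_replace_hashes_with_count matrix out) := by unfold Spec_replace_hashes_with_count; infer_instance

-- ===== CLAIM (what is proved, stated in full; the proofs are below) =====
def Claim_equal_replace_hashes_with_count : Prop := ∀ (matrix : List (List String)), Dom_replace_hashes_with_count matrix → Spec_replace_hashes_with_count matrix (replace_hashes_with_count matrix)

-- ===== LEMMAS AND PROOFS =====

-- recursive characterisation of A
def rhwcLabelRow : List String → Int → List Int
  | [], _ => []
  | h :: t, c => if h == "#" then (c + 1) :: rhwcLabelRow t (c + 1) else 0 :: rhwcLabelRow t c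

def rhwcCountRow : List String → Int → Int
  | [], c => c
  | h :: t, c => rhwcCountRow t (if h == "#" then c + 1 else c)

def rhwcLabelMat : List (List String) → Int → List (List Int)
  | [], _ => []
  | r :: rs, c => rhwcLabelRow r c :: rhwcLabelMat rs (rhwcCountRow r c)

def rhwcCountMat : List (List String) → Int → Int
  | [], c => c
  | r :: rs, c => rhwcCountMat rs (rhwcCountRow r c)

theorem rhwc_foldA_cell (row : List String) (acc : List Int) (c : Int) :
    row.foldl rhwcStepCellA (acc, c) = (acc ++ rhwcLabelRow row c, rhwcCountRow row c) := by
  induction row generalizing acc c with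
  | nil => simp [rhwcLabelRow, rhwcCountRow]
  | cons h t ih =>
    by_cases hh : h == "#" <;>
      simp [rhwcStepCellA, rhwcLabelRow, rhwcCountRow, hh, ih]

theorem rhwc_foldA_row (rs : List (List String)) (acc : List (List Int)) (c : Int) :
    rs.foldl rhwcStepRowA (acc, c) = (acc ++ rhwcLabelMat rs c, rhwcCountMat rs c) := by
  induction rs generalizing acc c with
  | nil => simp [rhwcLabelMat, rhwcCountMat]
  | cons r rest ih =>
    simp [rhwcStepRowA, rhwc_foldA_cell, rhwcLabelMat, rhwcCountMat, ih]

theorem rhwc_A_eq (matrix : List (List String)) :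
    replace_hashes_with_count matrix = (rhwcLabelMat matrix 0, rhwcCountMat matrix 0) := by
  simp [replace_hashes_with_count, rhwc_foldA_row]

-- recursive characterisation of B's first pass (Nat-valued coordinates)
def rhwcHashJsN : List String → Nat → List Nat
  | [], _ => []
  | h :: t, j => if h == "#" then j :: rhwcHashJsN t (j + 1) else rhwcHashJsN t (j + 1)

def rhwcPosMatN : List (List String) → Nat → List (Nat × Nat)
  | [], _ => []
  | r :: rs, i => (rhwcHashJsN r 0).map (fun j => (i, j)) ++ rhwcPosMatN rs (i + 1)

def rhwcCastPair (p : Nat × Nat) : Int × Int := ((p.1 : Int), (p.2 : Int))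

theorem rhwc_hashJsN_shift (t : List String) (j : Nat) :
    rhwcHashJsN t (j + 1) = (rhwcHashJsN t j).map (· + 1) := by
  induction t generalizing j with
  | nil => simp [rhwcHashJsN]
  | cons h tl ih =>
    by_cases hh : h == "#" <;> simp [rhwcHashJsN, hh, ih]

theorem rhwc_hashJsN_len (t : List String) (j : Nat) :
    (rhwcHashJsN t j).length = (rhwcHashJsN t 0).length := by
  induction t generalizing j with
  | nil => simp [rhwcHashJsN]
  | cons h tl ih =>
    by_cases hh : h == "#" <;> simp [rhwcHashJsN, hh, ih 1, ih (j + 1)]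

theorem rhwc_posMatN_shift (rs : List (List String)) (i : Nat) :
    rhwcPosMatN rs (i + 1) = (rhwcPosMatN rs i).map (fun p => (p.1 + 1, p.2)) := by
  induction rs generalizing i with
  | nil => simp [rhwcPosMatN]
  | cons r rest ih => simp [rhwcPosMatN, ih (i + 1), List.map_map, Function.comp, ih]

theorem rhwc_posMatN_len (rs : List (List String)) (i : Nat) :
    (rhwcPosMatN rs i).length = (rhwcPosMatN rs 0).length := by
  induction i with
  | zero => rfl
  | succ n ih => simp [rhwc_posMatN_shift, ih]

theorem rhwc_foldB_cell (row : List String) (i j : Nat) (zacc : List Int) (pacc : List (Int × Int)) :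
    (PySem.List.enumerate row (j : Int)).foldl (rhwcStepCellB (i : Int)) (zacc, pacc) =
      (zacc ++ List.replicate row.length (0 : Int),
       pacc ++ ((rhwcHashJsN row j).map (fun j' => (i, j'))).map rhwcCastPair) := by
  induction row generalizing j zacc pacc with
  | nil => simp [PySem.List.enumerate_nil, rhwcHashJsN]
  | cons h t ih =>
    have ih' := ih (j + 1) (zacc ++ [(0 : Int)])
      (if h == "#" then pacc ++ [((i : Int), (j : Int))] else pacc)
    push_cast at ih'
    by_cases hh : h == "#" <;> simp only [hh, if_true, if_false, Bool.false_eq_true] at ih' <;>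
      simp only [PySem.List.enumerate_cons, List.foldl_cons, rhwcStepCellB, hh, if_true, if_false,
        Bool.false_eq_true, ih'] <;>
      simp [rhwcHashJsN, hh, rhwcCastPair, List.replicate_succ]

theorem rhwc_foldB_row (rs : List (List String)) (i : Nat) (zacc : List (List Int)) (pacc : List (Int × Int)) :
    (PySem.List.enumerate rs (i : Int)).foldl rhwcStepRowB (zacc, pacc) =
      (zacc ++ rs.map (fun row => List.replicate row.length (0 : Int)),
       pacc ++ (rhwcPosMatN rs i).map rhwcCastPair) := by
  induction rs generalizing i zacc pacc with
  | nil => simp [PySem.List.enumerate_nil, rhwcPosMatN]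
  | cons r rest ih =>
    have hcell := rhwc_foldB_cell r i 0 [] pacc
    push_cast at hcell
    have ih' := ih (i + 1) (zacc ++ [List.replicate r.length (0 : Int)])
      (pacc ++ ((rhwcHashJsN r 0).map (fun j' => (i, j'))).map rhwcCastPair)
    push_cast at ih'
    simp only [List.map_map] at hcell ih'
    simp only [PySem.List.enumerate_cons, List.foldl_cons, rhwcStepRowB, hcell,
      List.nil_append]
    rw [ih']
    simp [rhwcPosMatN, List.map_map]

-- B's second pass, over Nat coordinates
def rhwcSet2N (m : List (List Int)) (i j : Nat) (v : Int) : List (List Int) :=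
  m.set i ((m.getD i []).set j v)

def rhwcGoN : List (List Int) → List (Nat × Nat) → Int → List (List Int)
  | m, [], _ => m
  | m, (i, j) :: ps, k => rhwcGoN (rhwcSet2N m i j (k + 1)) ps (k + 1)

def rhwcGoRowN : List Int → List Nat → Int → List Int
  | z, [], _ => z
  | z, j :: js, k => rhwcGoRowN (z.set j (k + 1)) js (k + 1)

theorem rhwc_set2_cast (m : List (List Int)) (i j : Nat) (v : Int) :
    rhwcSet2 m (i : Int) (j : Int) v = rhwcSet2N m i j v := by
  simp [rhwcSet2, rhwcSet2N]

theorem rhwc_fold2 (ps : List (Nat × Nat)) (m : List (List Int)) (k : Nat) :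
    (PySem.List.enumerate (ps.map rhwcCastPair) (k : Int)).foldl rhwcStepSet m =
      rhwcGoN m ps (k : Int) := by
  induction ps generalizing m k with
  | nil => simp [PySem.List.enumerate_nil, rhwcGoN]
  | cons p rest ih =>
    obtain ⟨i, j⟩ := p
    have ih' := ih (rhwcSet2N m i j ((k : Int) + 1)) (k + 1)
    push_cast at ih'
    simp only [List.map_cons, PySem.List.enumerate_cons, List.foldl_cons, rhwcStepSet,
      rhwcCastPair, rhwc_set2_cast, ih', rhwcGoN]

theorem rhwc_goN_append (ps qs : List (Nat × Nat)) (m : List (List Int)) (c : Int) :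
    rhwcGoN m (ps ++ qs) c = rhwcGoN (rhwcGoN m ps c) qs (c + ps.length) := by
  induction ps generalizing m c with
  | nil => simp [rhwcGoN]
  | cons p rest ih =>
    obtain ⟨i, j⟩ := p
    have : c + 1 + (rest.length : Int) = c + ((rest.length : Int) + 1) := by ring
    simp [rhwcGoN, ih, this]

theorem rhwc_goN_row0 (js : List Nat) (z : List Int) (m : List (List Int)) (c : Int) :
    rhwcGoN (z :: m) (js.map (fun j => (0, j))) c = rhwcGoRowN z js c :: m := by
  induction js generalizing z c with
  | nil => simp [rhwcGoN, rhwcGoRowN]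
  | cons j rest ih => simp [rhwcGoN, rhwcGoRowN, rhwcSet2N, ih]

theorem rhwc_goN_shift (ps : List (Nat × Nat)) (z : List Int) (m : List (List Int)) (c : Int) :
    rhwcGoN (z :: m) (ps.map (fun p => (p.1 + 1, p.2))) c = z :: rhwcGoN m ps c := by
  induction ps generalizing m c with
  | nil => simp [rhwcGoN]
  | cons p rest ih =>
    obtain ⟨i, j⟩ := p
    simp [rhwcGoN, rhwcSet2N, ih]

theorem rhwc_goRowN_shift (js : List Nat) (a : Int) (z : List Int) (c : Int) :
    rhwcGoRowN (a :: z) (js.map (· + 1)) c = a :: rhwcGoRowN z js c := by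
  induction js generalizing z c a with
  | nil => simp [rhwcGoRowN]
  | cons j rest ih => simp [rhwcGoRowN, ih]

theorem rhwc_goRowN_label (r : List String) (c : Int) :
    rhwcGoRowN (List.replicate r.length (0 : Int)) (rhwcHashJsN r 0) c = rhwcLabelRow r c := by
  induction r generalizing c with
  | nil => simp [rhwcGoRowN, rhwcHashJsN, rhwcLabelRow]
  | cons h t ih =>
    by_cases hh : h == "#" <;>
      simp [rhwcHashJsN, rhwcLabelRow, hh, rhwc_hashJsN_shift t 0, rhwcGoRowN,
        List.replicate_succ, rhwc_goRowN_shift, ih]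

theorem rhwc_countRow_len (r : List String) (c : Int) :
    rhwcCountRow r c = c + ((rhwcHashJsN r 0).length : Int) := by
  induction r generalizing c with
  | nil => simp [rhwcCountRow, rhwcHashJsN]
  | cons h t ih =>
    by_cases hh : h == "#" <;>
      simp [rhwcCountRow, rhwcHashJsN, hh, ih, rhwc_hashJsN_len t 1]
    ring

theorem rhwc_goN_label (rs : List (List String)) (c : Int) :
    rhwcGoN (rs.map (fun row => List.replicate row.length (0 : Int))) (rhwcPosMatN rs 0) c =
      rhwcLabelMat rs c := by
  induction rs generalizing c with
  | nil => simp [rhwcGoN, rhwcPosMatN, rhwcLabelMat]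
  | cons r rest ih =>
    simp only [List.map_cons, rhwcPosMatN, rhwc_posMatN_shift rest 0, rhwc_goN_append,
      rhwc_goN_row0, rhwc_goRowN_label, rhwc_goN_shift, List.length_map, ih,
      rhwcLabelMat]
    rw [rhwc_countRow_len]

theorem rhwc_countMat_len (rs : List (List String)) (c : Int) :
    rhwcCountMat rs c = c + ((rhwcPosMatN rs 0).length : Int) := by
  induction rs generalizing c with
  | nil => simp [rhwcCountMat, rhwcPosMatN]
  | cons r rest ih =>
    simp [rhwcCountMat, rhwcPosMatN, ih, rhwc_countRow_len, rhwc_posMatN_len rest 1]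
    ring

theorem rhwc_B_eq (matrix : List (List String)) :
    replace_hashes_with_count_alt matrix = (rhwcLabelMat matrix 0, rhwcCountMat matrix 0) := by
  have hrow := rhwc_foldB_row matrix 0 [] []
  push_cast at hrow
  simp only [replace_hashes_with_count_alt, hrow, List.nil_append]
  have h2 := rhwc_fold2 (rhwcPosMatN matrix 0) (matrix.map (fun row => List.replicate row.length (0 : Int))) 0
  push_cast at h2
  rw [h2, rhwc_goN_label, rhwc_countMat_len]
  simp

-- ===== VERDICT (by name: the statement is the Claim_ definition above) =====
theorem replace_hashes_with_count_spec : Claim_equal_replace_hashes_with_count := by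
  intro matrix _
  unfold Spec_replace_hashes_with_count
  rw [rhwc_A_eq, rhwc_B_eq]
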